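-- pv_equiv track=rewrite | github.com/PKPDAI/PKRelations | pkrex/models/utils.py | simplify_labels_and_tokens
-- ===== SOURCE A (Python) =====
-- from typing import Dict, List, Tuple, Any
--
-- def simplify_labels_and_tokens(sample_tokens: List[str], sample_labels: List[str],
--                                irrelevant_label: str) -> Tuple[List[str], List[str]]:
--     """
--
--     @param sample_tokens: ["[CLS]", "hi", "##ho","hey", "huu", ".", "[SEP]", "[PAD]", "[PAD]"]
--     @param sample_labels: ["-", "B-PK", "-","I-PK", "O", "O", "[SEP]", "[PAD]", "[PAD]"]
--     @param irrelevant_label: "-"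
--     @return: ["hi", "##ho","hey", "huu", "."], ["B-PK", "I-PK","I-PK", "O", "O"]
--     """
--     sample_tokens_clean = []
--     sample_labels_clean = []
--     prev_label = None
--     for token, label in zip(sample_tokens, sample_labels):
--         if token not in ['[CLS]', '[SEP]', '[PAD]']:
--             sample_tokens_clean.append(token)
--             if label == irrelevant_label:
--                 if "B" in prev_label:
--                     new_label = "I-" + prev_label.split("-")[1]
--                 else:
--                     new_label = prev_label
--                 sample_labels_clean.append(new_label)
--                 prev_label = new_label
--             else:
--                 sample_labels_clean.append(label)
--                 prev_label = label
--     assert len(sample_tokens_clean) == len(sample_labels_clean)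
--     return sample_tokens_clean, sample_labels_clean
-- ===== SOURCE B (Python) =====
-- from itertools import groupby
--
-- _SPECIAL = ('[CLS]', '[SEP]', '[PAD]')
--
--
-- def simplify_labels_and_tokens(sample_tokens, sample_labels, irrelevant_label):
--     kept = [(t, l) for t, l in zip(sample_tokens, sample_labels) if t not in _SPECIAL]
--     tokens = [t for t, _ in kept]
--     labels = []
--     # group the kept labels into maximal runs of irrelevant / non-irrelevant labels;
--     # an irrelevant run is filled with ONE value derived from the last emitted label
--     for is_irr, grp in groupby((l for _, l in kept), key=lambda l: l == irrelevant_label):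
--         run = list(grp)
--         if is_irr:
--             prev = labels[-1]
--             fill = 'I-' + prev.split('-')[1] if 'B' in prev else prev
--             labels.extend([fill] * len(run))
--         else:
--             labels.extend(run)
--     return tokens, labels
-- ===== Notes on version B (the rewrite author's own statement) =====
-- stated objective: alternative
-- what changed: A is a single-pass state machine threading prev_label through every emitted label; B filters, then run-length groups the kept labels (itertools.groupby) and fills each maximal irrelevant run with one value computed once from the last emitted real label, replicated over the run.
import Mathlib
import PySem

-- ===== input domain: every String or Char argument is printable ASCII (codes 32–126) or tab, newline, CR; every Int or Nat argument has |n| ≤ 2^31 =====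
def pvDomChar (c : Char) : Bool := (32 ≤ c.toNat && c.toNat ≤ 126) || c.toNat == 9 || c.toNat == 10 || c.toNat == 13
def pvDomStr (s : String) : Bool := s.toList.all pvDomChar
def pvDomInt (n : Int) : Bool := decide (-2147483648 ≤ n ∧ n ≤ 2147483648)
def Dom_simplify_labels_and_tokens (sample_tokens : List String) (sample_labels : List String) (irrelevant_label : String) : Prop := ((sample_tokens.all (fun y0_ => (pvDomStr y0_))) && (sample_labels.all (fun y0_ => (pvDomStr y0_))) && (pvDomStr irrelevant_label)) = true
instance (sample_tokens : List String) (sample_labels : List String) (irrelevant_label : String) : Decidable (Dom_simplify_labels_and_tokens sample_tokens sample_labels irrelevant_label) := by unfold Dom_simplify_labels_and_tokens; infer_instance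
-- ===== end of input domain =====

-- B filters, then run-length groups the kept labels (groupby) and fills each irrelevant run
-- with one value computed from the last emitted label, instead of threading per-element state (objective: alternative).


-- ===== PORT A =====
def pvSpecials : List String := ["[CLS]", "[SEP]", "[PAD]"]

-- 'I-' + prev_label.split('-')[1] if 'B' in prev_label else prev_label; the `none` case and a
-- failed [1] are Python's TypeError/IndexError, excluded by Pre_
def pvNewLabel (prev : Option String) : String :=
  match prev with
  | some p =>
      if PySem.Str.isIn "B" p then
        "I-" ++ ((PySem.List.pyGet? ((PySem.Str.split? p "-").getD []) 1).getD "")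
      else p
  | none => ""

def pvStepA (irr : String) (st : List String × List String × Option String) (tl : String × String) :
    List String × List String × Option String :=
  if tl.1 ∉ pvSpecials then
    if tl.2 = irr then
      let nl := pvNewLabel st.2.2
      (st.1 ++ [tl.1], st.2.1 ++ [nl], some nl)
    else
      (st.1 ++ [tl.1], st.2.1 ++ [tl.2], some tl.2)
  else st

def simplify_labels_and_tokens (sample_tokens : List String) (sample_labels : List String) (irrelevant_label : String) : List String × List String :=
  let r := (sample_tokens.zip sample_labels).foldl (pvStepA irrelevant_label) ([], [], none)
  (r.1, r.2.1)

-- ===== PORT B =====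
def pvKept (sample_tokens sample_labels : List String) : List (String × String) :=
  (sample_tokens.zip sample_labels).filter (fun tl => tl.1 ∉ pvSpecials)

-- itertools.groupby with key (l == irrelevant_label): maximal runs, tagged with their key
def pvRuns (irr : String) : List String → List (Bool × List String)
  | [] => []
  | l :: rest =>
    let b := (l == irr)
    ((b, l :: rest.takeWhile (fun x => (x == irr) == b)) ::
      pvRuns irr (rest.dropWhile (fun x => (x == irr) == b)))
  termination_by L => L.length
  decreasing_by
    exact Nat.lt_succ_of_le (List.length_dropWhile_le _ _)

-- labels[-1] then «'I-' + prev.split('-')[1] if 'B' in prev else prev»; `none` = Python IndexError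
def pvFill (prev? : Option String) : String :=
  match prev? with
  | some p =>
      if PySem.Str.isIn "B" p then
        "I-" ++ ((PySem.List.pyGet? ((PySem.Str.split? p "-").getD []) 1).getD "")
      else p
  | none => ""

def pvRunStep (acc : List String) (r : Bool × List String) : List String :=
  if r.1 then acc ++ List.replicate r.2.length (pvFill acc.getLast?)
  else acc ++ r.2

def simplify_labels_and_tokens_alt (sample_tokens : List String) (sample_labels : List String) (irrelevant_label : String) : List String × List String :=
  let kept := pvKept sample_tokens sample_labels
  (kept.map Prod.fst, (pvRuns irrelevant_label (kept.map Prod.snd)).foldl pvRunStep [])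

-- ===== PRECONDITION & SPEC =====
-- Pre_ excludes exactly the inputs where Python A raises: a first kept label that is irrelevant
-- (TypeError: 'B' in None), or an irrelevant kept label whose predecessor is a non-irrelevant label
-- containing 'B' but no '-' (IndexError on split('-')[1]).
def Pre_simplify_labels_and_tokens (sample_tokens : List String) (sample_labels : List String) (irrelevant_label : String) : Prop :=
  ((pvKept sample_tokens sample_labels).map Prod.snd).head? ≠ some irrelevant_label ∧
  List.IsChain (fun a b => b = irrelevant_label →
      ¬(a ≠ irrelevant_label ∧ PySem.Str.isIn "B" a = true ∧ PySem.Str.isIn "-" a = false))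
    ((pvKept sample_tokens sample_labels).map Prod.snd)
instance (sample_tokens : List String) (sample_labels : List String) (irrelevant_label : String) : Decidable (Pre_simplify_labels_and_tokens sample_tokens sample_labels irrelevant_label) := by unfold Pre_simplify_labels_and_tokens; infer_instance

def pvWitness_simplify_labels_and_tokens : List String × List String × String :=
  (["[CLS]", "hi", "##ho", "hey", "huu", ".", "[SEP]"], ["-", "B-PK", "-", "I-PK", "O", "O", "[SEP]"], "-")

def Spec_simplify_labels_and_tokens (sample_tokens : List String) (sample_labels : List String) (irrelevant_label : String) (out : List String × List String) : Prop := out = simplify_labels_and_tokens_alt sample_tokens sample_labels irrelevant_label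
instance (sample_tokens : List String) (sample_labels : List String) (irrelevant_label : String) (out : List String × List String) : Decidable (Spec_simplify_labels_and_tokens sample_tokens sample_labels irrelevant_label out) := by unfold Spec_simplify_labels_and_tokens; infer_instance

-- ===== CLAIM (what is proved, stated in full; the proofs are below) =====
def Claim_equal_simplify_labels_and_tokens : Prop := ∀ (sample_tokens : List String) (sample_labels : List String) (irrelevant_label : String), Dom_simplify_labels_and_tokens sample_tokens sample_labels irrelevant_label → Pre_simplify_labels_and_tokens sample_tokens sample_labels irrelevant_label → Spec_simplify_labels_and_tokens sample_tokens sample_labels irrelevant_label (simplify_labels_and_tokens sample_tokens sample_labels irrelevant_label)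

-- ===== LEMMAS AND PROOFS =====

-- reference model of Python's str.split('-') used only in proofs
def pvSplit1 : List Char → List (List Char)
  | [] => [[]]
  | c :: rest => if c = '-' then [] :: pvSplit1 rest else (pvSplit1 rest).modifyHead (c :: ·)

theorem pvSplit1_ne_nil (l : List Char) : pvSplit1 l ≠ [] := by
  induction l with
  | nil => simp [pvSplit1]
  | cons c rest ih =>
    simp only [pvSplit1]
    split
    · simp
    · cases h : pvSplit1 rest with
      | nil => exact absurd h ih
      | cons a t => simp

theorem pvGo_eq (l : List Char) : ∀ (fuel : Nat) (cur : List Char) (acc : List (List Char)),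
    l.length ≤ fuel →
    PySem.Chars.splitOn.go ['-'] fuel l cur acc
      = acc.reverse ++ (pvSplit1 l).modifyHead (cur.reverse ++ ·) := by
  induction l with
  | nil =>
    intro fuel cur acc _
    cases fuel <;> rw [PySem.Chars.splitOn.go] <;> simp [pvSplit1]
  | cons c rest ih =>
    intro fuel cur acc hf
    cases fuel with
    | zero => simp at hf
    | succ f =>
      rw [PySem.Chars.splitOn.go]
      by_cases hc : c = '-'
      · subst hc
        have hpre : (['-'].isPrefixOf ('-' :: rest)) = true := by simp [List.isPrefixOf]
        rw [if_pos hpre]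
        have hdrop : List.drop (['-'] : List Char).length ('-' :: rest) = rest := by simp
        rw [hdrop]
        have := ih f [] (cur.reverse :: acc) (by simpa using Nat.le_of_succ_le_succ hf)
        rw [this]
        have hmh : (pvSplit1 rest).modifyHead (([] : List Char).reverse ++ ·) = pvSplit1 rest := by
          cases h : pvSplit1 rest with
          | nil => simp
          | cons a t => simp
        rw [hmh]
        simp [pvSplit1]
      · have hpre : (['-'].isPrefixOf (c :: rest)) = false := by
          simp [List.isPrefixOf]
          exact fun h => absurd h.symm hc
        rw [hpre]
        simp only [Bool.false_eq_true, if_false]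
        have := ih f (c :: cur) acc (by simpa using Nat.le_of_succ_le_succ hf)
        rw [this]
        have : (pvSplit1 (c :: rest)).modifyHead (cur.reverse ++ ·)
            = (pvSplit1 rest).modifyHead ((c :: cur).reverse ++ ·) := by
          simp only [pvSplit1, if_neg hc, List.modifyHead_modifyHead]
          congr 1
          funext x
          simp
        rw [this]

theorem pvSplitOn_eq (l : List Char) : PySem.Chars.splitOn l ['-'] = pvSplit1 l := by
  unfold PySem.Chars.splitOn
  rw [pvGo_eq l (l.length + 1) [] [] (Nat.le_succ _)]
  cases h : pvSplit1 l with
  | nil => exact absurd h (pvSplit1_ne_nil l)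
  | cons a t => simp

theorem pvSplit1_no_dash (l : List Char) (h : '-' ∉ l) : pvSplit1 l = [l] := by
  induction l with
  | nil => rfl
  | cons c rest ih =>
    simp only [List.mem_cons, not_or] at h
    have hc : ¬ c = '-' := fun hc => h.1 hc.symm
    simp [pvSplit1, hc, ih h.2]

theorem pvSplit1_append (a b : List Char) (h : '-' ∉ a) :
    pvSplit1 (a ++ '-' :: b) = a :: pvSplit1 b := by
  induction a with
  | nil => simp [pvSplit1]
  | cons c rest ih =>
    simp only [List.mem_cons, not_or] at h
    have hc : ¬ c = '-' := fun hc => h.1 hc.symm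
    simp [List.cons_append, pvSplit1, hc, ih h.2]

theorem pvSplit1_head (b : List Char) : ∃ h t, pvSplit1 b = h :: t ∧ '-' ∉ h := by
  induction b with
  | nil => exact ⟨[], [], rfl, by simp⟩
  | cons c rest ih =>
    by_cases hc : c = '-'
    · exact ⟨[], pvSplit1 rest, by simp [pvSplit1, hc], by simp⟩
    · obtain ⟨h, t, he, hm⟩ := ih
      refine ⟨c :: h, t, by simp [pvSplit1, hc, he], ?_⟩
      simp only [List.mem_cons, not_or]
      exact ⟨fun h' => hc h'.symm, hm⟩

-- 'c ∈ s' (single-character substring test) reading of PySem.Str.isIn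
theorem pvSingleton_infix (c : Char) (l : List Char) : [c] <:+: l ↔ c ∈ l := by
  constructor
  · rintro ⟨s, t, rfl⟩; simp
  · intro h
    obtain ⟨s, t, rfl⟩ := List.mem_iff_append.mp h
    exact ⟨s, t, by simp⟩

theorem pvIsIn_B (p : String) : PySem.Str.isIn "B" p = true ↔ 'B' ∈ p.toList := by
  rw [PySem.Str.isIn, show "B".toList = ['B'] from rfl, PySem.Chars.isIn_iff_infix,
    pvSingleton_infix]

theorem pvIsIn_dash (p : String) : PySem.Str.isIn "-" p = true ↔ '-' ∈ p.toList := by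
  rw [PySem.Str.isIn, show "-".toList = ['-'] from rfl, PySem.Chars.isIn_iff_infix,
    pvSingleton_infix]

def pvGood (s : String) : Prop := PySem.Str.isIn "B" s = true → PySem.Str.isIn "-" s = true

-- when prev contains both 'B' and '-', pvNewLabel returns "I-" ++ (a dash-free chunk)
theorem pvNewLabel_shape (p : String) (hB : 'B' ∈ p.toList) (hD : '-' ∈ p.toList) :
    ∃ h : List Char, '-' ∉ h ∧ pvNewLabel (some p) = "I-" ++ String.ofList h := by
  have hsplit : PySem.Str.split? p "-" = some ((pvSplit1 p.toList).map String.ofList) := by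
    rw [PySem.Str.split?, show "-".toList = ['-'] from rfl, PySem.Chars.split?]
    simp [pvSplitOn_eq]
  have hdw : p.toList.dropWhile (fun c => !(c = '-' : Bool)) ≠ [] := by
    intro hnil
    have := (List.dropWhile_eq_nil_iff.mp hnil) '-' hD
    simp at this
  set a := p.toList.takeWhile (fun c => !(c = '-' : Bool)) with ha
  set rest := p.toList.dropWhile (fun c => !(c = '-' : Bool)) with hrest
  obtain ⟨x, xs, hxx⟩ := List.exists_cons_of_ne_nil hdw
  have hx : x = '-' := by
    have h1 := List.head?_dropWhile_not (fun c => !(c = '-' : Bool)) p.toList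
    rw [← hrest, hxx] at h1
    simpa using h1
  have hdecomp : p.toList = a ++ '-' :: xs := by
    rw [← hx, ← hxx, ha, hrest]
    exact (List.takeWhile_append_dropWhile).symm
  have hna : '-' ∉ a := by
    intro hm
    have := List.mem_takeWhile_imp hm
    simp at this
  obtain ⟨h, t, hht, hnh⟩ := pvSplit1_head xs
  have hchunks : pvSplit1 p.toList = a :: h :: t := by
    rw [hdecomp, pvSplit1_append _ _ hna, hht]
  refine ⟨h, hnh, ?_⟩
  rw [pvNewLabel, if_pos ((pvIsIn_B p).mpr hB), hsplit]
  simp [hchunks, PySem.List.pyGet?, PySem.List.pyIdx?]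

theorem pvNewLabel_idem (p : String) (hp : pvGood p) :
    pvNewLabel (some (pvNewLabel (some p))) = pvNewLabel (some p) := by
  by_cases hB : PySem.Str.isIn "B" p = true
  · obtain ⟨h, hnh, he⟩ := pvNewLabel_shape p ((pvIsIn_B p).mp hB) ((pvIsIn_dash p).mp (hp hB))
    rw [he]
    have htl : ("I-" ++ String.ofList h).toList = 'I' :: '-' :: h := by
      simp [String.toList_append]
    by_cases hB2 : PySem.Str.isIn "B" ("I-" ++ String.ofList h) = true
    · have hB2' : 'B' ∈ ('I' :: '-' :: h) := by rw [← htl]; exact (pvIsIn_B _).mp hB2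
      obtain ⟨h2, hnh2, he2⟩ := pvNewLabel_shape ("I-" ++ String.ofList h)
        (htl ▸ hB2') (by rw [htl]; simp)
      have hsplit : PySem.Str.split? ("I-" ++ String.ofList h) "-"
          = some ((pvSplit1 ('I' :: '-' :: h)).map String.ofList) := by
        rw [PySem.Str.split?, show "-".toList = ['-'] from rfl, PySem.Chars.split?]
        simp [pvSplitOn_eq, htl]
      have hchunks : pvSplit1 ('I' :: '-' :: h) = ['I'] :: h :: [] := by
        have : ('I' :: '-' :: h) = ['I'] ++ '-' :: h := rfl
        rw [this, pvSplit1_append _ _ (by simp), pvSplit1_no_dash h hnh]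
      rw [pvNewLabel, if_pos hB2, hsplit, hchunks]
      simp [PySem.List.pyGet?, PySem.List.pyIdx?]
    · rw [pvNewLabel, if_neg hB2]
  · have hpe : pvNewLabel (some p) = p := by rw [pvNewLabel, if_neg hB]
    rw [hpe, hpe]

-- the label/prev projection of A's loop body over kept elements (proof-only model)
def pvStepA2 (irr : String) (st : List String × Option String) (tl : String × String) :
    List String × Option String :=
  if tl.2 = irr then (st.1 ++ [pvNewLabel st.2], some (pvNewLabel st.2))
  else (st.1 ++ [tl.2], some tl.2)

-- element-wise model sitting between A's threaded state and B's run fold (proof-only)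
def pvStepB (irr : String) (st : List String × Option String) (l : String) :
    List String × Option String :=
  if l = irr then (st.1 ++ [pvNewLabel st.2], st.2)
  else (st.1 ++ [l], some l)

theorem pvFoldA_filter (irr : String) (pairs : List (String × String)) :
    ∀ st, pairs.foldl (pvStepA irr) st
      = (pairs.filter (fun tl => tl.1 ∉ pvSpecials)).foldl (pvStepA irr) st := by
  induction pairs with
  | nil => intro st; rfl
  | cons tl rest ih =>
    intro st
    by_cases h : tl.1 ∈ pvSpecials
    · have hstep : pvStepA irr st tl = st := by simp [pvStepA, h]
      simp [h, List.foldl_cons, hstep, ih]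
    · simp [h, List.foldl_cons, ih]

theorem pvFoldA_tokens (irr : String) (ks : List (String × String)) :
    ∀ (tc lc : List String) (prev : Option String), (∀ tl ∈ ks, tl.1 ∉ pvSpecials) →
    (ks.foldl (pvStepA irr) (tc, lc, prev)).1 = tc ++ ks.map Prod.fst := by
  induction ks with
  | nil => intro tc lc prev _; simp
  | cons tl rest ih =>
    intro tc lc prev hk
    have h1 := hk tl (by simp)
    have hrest : ∀ tl ∈ rest, tl.1 ∉ pvSpecials := fun x hx => hk x (by simp [hx])
    simp only [List.foldl_cons, pvStepA, if_pos h1]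
    by_cases h2 : tl.2 = irr <;> simp [h2, ih _ _ _ hrest]

theorem pvFoldA_proj (irr : String) (ks : List (String × String)) :
    ∀ (tc lc : List String) (prev : Option String), (∀ tl ∈ ks, tl.1 ∉ pvSpecials) →
    (ks.foldl (pvStepA irr) (tc, lc, prev)).2 = ks.foldl (pvStepA2 irr) (lc, prev) := by
  induction ks with
  | nil => intro tc lc prev _; rfl
  | cons tl rest ih =>
    intro tc lc prev hk
    have h1 := hk tl (by simp)
    have hrest : ∀ tl ∈ rest, tl.1 ∉ pvSpecials := fun x hx => hk x (by simp [hx])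
    simp only [List.foldl_cons, pvStepA, pvStepA2, if_pos h1]
    by_cases h2 : tl.2 = irr <;> simp [h2, ih _ _ _ hrest]

-- the chain relation of Pre_
def pvP (irr : String) (a b : String) : Prop :=
  b = irr → ¬(a ≠ irr ∧ PySem.Str.isIn "B" a = true ∧ PySem.Str.isIn "-" a = false)

-- main invariant: A's threaded prev vs the last real label of the element-wise model
theorem pvMain (irr : String) (ks : List (String × String)) :
    ∀ (lc : List String) (prevA lastB : Option String),
    ((prevA = none ∧ lastB = none) ∨
      (∃ L, lastB = some L ∧ (prevA = some L ∨ (pvGood L ∧ prevA = some (pvNewLabel (some L)))))) →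
    (∀ p ∈ ks.head?, p.2 = irr → ∃ L, lastB = some L ∧ pvGood L) →
    List.IsChain (pvP irr) (ks.map Prod.snd) →
    (ks.foldl (pvStepA2 irr) (lc, prevA)).1 = (ks.foldl (fun st tl => pvStepB irr st tl.2) (lc, lastB)).1 := by
  induction ks with
  | nil => intro lc prevA lastB _ _ _; rfl
  | cons tl rest ih =>
    intro lc prevA lastB hinv hhead hchain
    by_cases h2 : tl.2 = irr
    · obtain ⟨L, hL, hgood⟩ := hhead tl (by simp) h2
      have hemit : pvNewLabel prevA = pvNewLabel (some L) := by
        rcases hinv with ⟨_, hB⟩ | ⟨L', hL', hcase⟩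
        · rw [hL] at hB; cases hB
        · rw [hL] at hL'; injection hL' with hLL; subst hLL
          rcases hcase with h | ⟨hg, h⟩
          · rw [h]
          · rw [h]; exact pvNewLabel_idem L hgood
      simp only [List.foldl_cons, pvStepA2, pvStepB, if_pos h2, hemit, hL]
      apply ih
      · exact Or.inr ⟨L, rfl, Or.inr ⟨hgood, rfl⟩⟩
      · intro p hp _
        exact ⟨L, rfl, hgood⟩
      · cases rest with
        | nil => simp
        | cons q qs =>
          simp only [List.map_cons] at hchain
          exact (List.isChain_cons_cons.mp hchain).2
    · simp only [List.foldl_cons, pvStepA2, pvStepB, if_neg h2]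
      apply ih
      · exact Or.inr ⟨tl.2, rfl, Or.inl rfl⟩
      · intro p hp hpirr
        refine ⟨tl.2, rfl, ?_⟩
        cases rest with
        | nil => simp at hp
        | cons q qs =>
          simp only [List.head?_cons, Option.mem_some_iff] at hp
          subst hp
          simp only [List.map_cons] at hchain
          have := (List.isChain_cons_cons.mp hchain).1 hpirr
          intro hB
          by_contra hdash
          exact this ⟨h2, hB, by simpa using hdash⟩
      · cases rest with
        | nil => simp
        | cons q qs =>
          simp only [List.map_cons] at hchain
          exact (List.isChain_cons_cons.mp hchain).2

-- folding pvStepB over an all-irrelevant run: fill replicated, last unchanged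
theorem pvFoldB_irr (irr : String) (g : List String) (hg : ∀ x ∈ g, x = irr) :
    ∀ (acc : List String) (lastB : Option String),
    g.foldl (pvStepB irr) (acc, lastB) = (acc ++ List.replicate g.length (pvNewLabel lastB), lastB) := by
  induction g with
  | nil => intro acc lastB; simp
  | cons x xs ih =>
    intro acc lastB
    have hx : x = irr := hg x (by simp)
    simp only [List.foldl_cons, pvStepB, if_pos hx,
      ih (fun y hy => hg y (by simp [hy]))]
    simp [List.replicate_succ, List.append_assoc]

-- folding pvStepB over an all-real run: labels appended, last = run's last element
theorem pvFoldB_real (irr : String) (g : List String) (hg : ∀ x ∈ g, ¬ x = irr) :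
    ∀ (acc : List String) (lastB : Option String),
    g.foldl (pvStepB irr) (acc, lastB) = (acc ++ g, if g = [] then lastB else g.getLast?) := by
  induction g with
  | nil => intro acc lastB; simp
  | cons x xs ih =>
    intro acc lastB
    have hx : ¬ x = irr := hg x (by simp)
    simp only [List.foldl_cons, pvStepB, if_neg hx,
      ih (fun y hy => hg y (by simp [hy]))]
    cases xs with
    | nil => simp
    | cons y ys => simp [List.getLast?_cons_cons]

-- B's run-based fold equals the element-wise fold, for any label list
theorem pvRunsFoldAux (irr : String) : ∀ (n : Nat) (L : List String), L.length ≤ n →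
    ∀ (acc : List String) (lastB : Option String),
    (∀ h, L.head? = some h → h = irr → acc.getLast? = lastB) →
    (pvRuns irr L).foldl pvRunStep acc = (L.foldl (pvStepB irr) (acc, lastB)).1 := by
  intro n
  induction n with
  | zero =>
    intro L hL acc lastB _
    rw [List.length_eq_zero_iff.mp (Nat.le_zero.mp hL), pvRuns]
    rfl
  | succ n ih =>
    intro L hL acc lastB hinv
    cases L with
    | nil => rw [pvRuns]; rfl
    | cons l rest =>
      have hruns : pvRuns irr (l :: rest)
          = ((l == irr), l :: rest.takeWhile (fun x => (x == irr) == (l == irr))) ::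
            pvRuns irr (rest.dropWhile (fun x => (x == irr) == (l == irr))) := by
        rw [pvRuns]
      have hsplit : l :: rest
          = (l :: rest.takeWhile (fun x => (x == irr) == (l == irr))) ++
            rest.dropWhile (fun x => (x == irr) == (l == irr)) := by
        simp [List.takeWhile_append_dropWhile]
      have hlen : (rest.dropWhile (fun x => (x == irr) == (l == irr))).length ≤ n := by
        have := List.length_dropWhile_le (fun x => (x == irr) == (l == irr)) rest
        simpa using Nat.le_trans this (Nat.le_of_succ_le_succ hL)
      rw [hruns, List.foldl_cons]
      conv_rhs => rw [hsplit]
      rw [List.foldl_append]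
      by_cases hb : l = irr
      · -- irrelevant run
        have hlast : acc.getLast? = lastB := hinv l rfl hb
        have hall : ∀ x ∈ l :: rest.takeWhile (fun x => (x == irr) == (l == irr)), x = irr := by
          intro x hx
          rcases List.mem_cons.mp hx with rfl | hx
          · exact hb
          · have := List.mem_takeWhile_imp hx
            simp [hb] at this
            exact this
        rw [pvFoldB_irr irr _ hall acc lastB]
        have hstep : pvRunStep acc ((l == irr),
            l :: rest.takeWhile (fun x => (x == irr) == (l == irr)))
            = acc ++ List.replicate (l :: rest.takeWhile (fun x => (x == irr) == (l == irr))).length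
                (pvNewLabel lastB) := by
          simp only [pvRunStep, hb, beq_self_eq_true, if_pos]
          rw [hlast]
          rfl
        rw [hstep]
        apply ih _ hlen
        intro h hh hirr
        exfalso
        have hd := List.head?_dropWhile_not (fun x => (x == irr) == (l == irr)) rest
        rw [hh] at hd
        simp [hb, hirr] at hd
      · -- real run
        have hall : ∀ x ∈ l :: rest.takeWhile (fun x => (x == irr) == (l == irr)), ¬ x = irr := by
          intro x hx
          rcases List.mem_cons.mp hx with rfl | hx
          · exact hb
          · have := List.mem_takeWhile_imp hx
            simp [hb] at this
            exact this
        rw [pvFoldB_real irr _ hall acc lastB]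
        have hstep : pvRunStep acc ((l == irr),
            l :: rest.takeWhile (fun x => (x == irr) == (l == irr)))
            = acc ++ (l :: rest.takeWhile (fun x => (x == irr) == (l == irr))) := by
          simp [pvRunStep, hb]
        rw [hstep]
        apply ih _ hlen
        intro h hh hirr
        have hne : (l :: rest.takeWhile (fun x => (x == irr) == (l == irr))) ≠ [] := by simp
        simp only [if_neg hne]
        rw [List.getLast?_append]
        cases hgl : (l :: rest.takeWhile (fun x => (x == irr) == (l == irr))).getLast? with
        | none => exact absurd (List.getLast?_eq_none_iff.mp hgl) hne
        | some v => simp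

theorem pvRunsFold (irr : String) (L : List String) (acc : List String) (lastB : Option String)
    (hinv : ∀ h, L.head? = some h → h = irr → acc.getLast? = lastB) :
    (pvRuns irr L).foldl pvRunStep acc = (L.foldl (pvStepB irr) (acc, lastB)).1 :=
  pvRunsFoldAux irr L.length L (Nat.le_refl _) acc lastB hinv

-- ===== VERDICT (by name: the statement is the Claim_ definition above) =====
theorem simplify_labels_and_tokens_spec : Claim_equal_simplify_labels_and_tokens := by
  intro ts ls irr _ hpre
  unfold Spec_simplify_labels_and_tokens
  unfold simplify_labels_and_tokens simplify_labels_and_tokens_alt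
  obtain ⟨hhd, hch⟩ := hpre
  rw [pvFoldA_filter irr (ts.zip ls) ([], [], none)]
  have hkept : (ts.zip ls).filter (fun tl => tl.1 ∉ pvSpecials) = pvKept ts ls := rfl
  rw [hkept]
  have hmem : ∀ tl ∈ pvKept ts ls, tl.1 ∉ pvSpecials := by
    intro tl htl
    have := List.of_mem_filter htl
    simpa using this
  refine Prod.ext ?_ ?_
  · simpa using pvFoldA_tokens irr (pvKept ts ls) [] [] none hmem
  · show ((pvKept ts ls).foldl (pvStepA irr) ([], [], none)).2.1 = _
    rw [pvFoldA_proj irr (pvKept ts ls) [] [] none hmem]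
    have helem : ((pvKept ts ls).foldl (pvStepA2 irr) ([], none)).1
        = ((pvKept ts ls).foldl (fun st tl => pvStepB irr st tl.2) ([], none)).1 := by
      apply pvMain irr (pvKept ts ls) [] none none (Or.inl ⟨rfl, rfl⟩)
      · intro p hp hpirr
        exfalso
        apply hhd
        rw [List.head?_map]
        cases hk : (pvKept ts ls).head? with
        | none => rw [hk] at hp; cases hp
        | some q =>
          rw [hk] at hp
          simp only [Option.mem_some_iff] at hp
          subst hp
          simp [hpirr]
      · exact hch
    rw [helem]
    have hmapfold : ((pvKept ts ls).foldl (fun st tl => pvStepB irr st tl.2) ([], none))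
        = (((pvKept ts ls).map Prod.snd).foldl (pvStepB irr) ([], none)) := by
      rw [List.foldl_map]
    rw [hmapfold]
    exact (pvRunsFold irr ((pvKept ts ls).map Prod.snd) [] none (by simp)).symm
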